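-- pv_equiv track=rewrite | github.com/SmikPatel/Q_SENSE_measurements | utils_states.py | somos_to_seniority_config
-- ===== SOURCE A (Python) =====
-- def somos_to_seniority_config(somos, Norb):
--     """
--     takes a list of singly occupied molecular orbitals and returns the list of seniority eigenvalues
--     """
--
--     config = []
--
--     for i in range(Norb):
--         if i in somos:
--             config.append(1)
--         else:
--             config.append(0)
--
--     return config
-- ===== SOURCE B (Python) =====
-- def somos_to_seniority_config(somos, Norb):
--     """
--     takes a list of singly occupied molecular orbitals and returns the list of seniority eigenvalues
--     """
--     config = [0] * max(Norb, 0)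
--     for s in somos:
--         if 0 <= s < Norb:
--             config[s] = 1
--     return config
-- ===== Notes on version B (the rewrite author's own statement) =====
-- stated objective: faster
-- what changed: B allocates [0]*Norb once and scatter-writes 1 at each in-range orbital in somos, instead of testing 'i in somos' for every i in range(Norb).
import Mathlib
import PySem

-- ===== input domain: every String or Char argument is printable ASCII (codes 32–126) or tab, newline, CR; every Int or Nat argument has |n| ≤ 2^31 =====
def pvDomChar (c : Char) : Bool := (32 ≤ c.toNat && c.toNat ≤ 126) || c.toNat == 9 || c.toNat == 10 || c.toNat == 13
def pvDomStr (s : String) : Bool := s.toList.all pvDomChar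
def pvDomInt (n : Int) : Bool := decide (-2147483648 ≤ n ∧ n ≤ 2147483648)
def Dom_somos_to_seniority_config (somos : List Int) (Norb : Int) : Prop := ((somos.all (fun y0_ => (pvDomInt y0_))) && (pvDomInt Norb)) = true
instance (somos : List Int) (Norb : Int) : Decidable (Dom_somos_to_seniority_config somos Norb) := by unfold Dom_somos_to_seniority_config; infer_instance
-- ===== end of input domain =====

-- B replaces A's per-orbital membership scan with a single scatter write into a zero list (faster: O(Norb+len) vs O(Norb*len)).


-- ===== PORT A =====
-- for i in range(Norb): config.append(1 if i in somos else 0)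
def somos_to_seniority_config (somos : List Int) (Norb : Int) : List Int :=
  (PySem.List.pyRange 0 Norb 1).foldl
    (fun config i => config ++ [if somos.contains i then 1 else 0]) []

-- ===== PORT B =====
-- config = [0]*max(Norb,0); for s in somos: if 0 <= s < Norb: config[s] = 1
def somos_to_seniority_config_alt (somos : List Int) (Norb : Int) : List Int :=
  somos.foldl
    (fun config s => if 0 ≤ s ∧ s < Norb then config.set s.toNat 1 else config)
    (List.replicate (max Norb 0).toNat 0)

-- ===== PRECONDITION & SPEC =====
def Spec_somos_to_seniority_config (somos : List Int) (Norb : Int) (out : List Int) : Prop := out = somos_to_seniority_config_alt somos Norb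
instance (somos : List Int) (Norb : Int) (out : List Int) : Decidable (Spec_somos_to_seniority_config somos Norb out) := by unfold Spec_somos_to_seniority_config; infer_instance

-- ===== CLAIM (what is proved, stated in full; the proofs are below) =====
def Claim_equal_somos_to_seniority_config : Prop := ∀ (somos : List Int) (Norb : Int), Dom_somos_to_seniority_config somos Norb → Spec_somos_to_seniority_config somos Norb (somos_to_seniority_config somos Norb)

-- ===== LEMMAS AND PROOFS =====

theorem map_singleton_flatMap (f : Int → Int) (l : List Int) :
    l.flatMap (fun i => [f i]) = l.map f := by
  induction l with
  | nil => rfl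
  | cons x xs ih => simp [List.flatMap_cons, ih]

-- A's fold-with-append is the pointwise indicator map over the range.
theorem portA_eq_map (somos : List Int) (Norb : Int) :
    somos_to_seniority_config somos Norb
      = (PySem.List.pyRange 0 Norb 1).map (fun i => if somos.contains i then 1 else 0) := by
  unfold somos_to_seniority_config
  rw [PySem.List.foldl_append_eq_flatMap]
  simp [map_singleton_flatMap]

-- B's scatter fold preserves length.
theorem scatter_length (somos : List Int) (Norb : Int) (config : List Int) :
    (somos.foldl
      (fun config s => if 0 ≤ s ∧ s < Norb then config.set s.toNat 1 else config)
      config).length = config.length := by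
  induction somos generalizing config with
  | nil => rfl
  | cons s ss ih =>
      simp only [List.foldl_cons]
      rw [ih]
      split_ifs <;> simp

-- Element j of B's scatter fold: 1 if some in-range s with s.toNat = j occurs, else the old entry.
theorem scatter_getD (somos : List Int) (Norb : Int) (config : List Int) (j : Nat)
    (hj : j < config.length) :
    (somos.foldl
      (fun config s => if 0 ≤ s ∧ s < Norb then config.set s.toNat 1 else config)
      config).getD j 0
      = if (∃ s ∈ somos, 0 ≤ s ∧ s < Norb ∧ s.toNat = j) then 1 else config.getD j 0 := by
  induction somos generalizing config with
  | nil => simp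
  | cons s ss ih =>
      simp only [List.foldl_cons]
      by_cases hs : 0 ≤ s ∧ s < Norb
      · rw [if_pos hs, ih (config.set s.toNat 1) (by simpa using hj)]
        by_cases hmem : ∃ t ∈ ss, 0 ≤ t ∧ t < Norb ∧ t.toNat = j
        · rw [if_pos hmem, if_pos]
          exact let ⟨t, ht, h1, h2, h3⟩ := hmem; ⟨t, List.mem_cons_of_mem _ ht, h1, h2, h3⟩
        · rw [if_neg hmem]
          by_cases hsj : s.toNat = j
          · rw [if_pos ⟨s, List.mem_cons_self, hs.1, hs.2, hsj⟩]
            subst hsj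
            rw [List.getD_eq_getElem _ _ (by simpa using hj), List.getElem_set_self (by simpa using hj)]
          · rw [List.getD_eq_getElem _ _ (by simpa using hj), List.getElem_set_ne hsj,
                ← List.getD_eq_getElem _ 0 hj]
            rw [if_neg]
            rintro ⟨t, ht, h1, h2, h3⟩
            rcases List.mem_cons.mp ht with rfl | ht
            · exact hsj h3
            · exact hmem ⟨t, ht, h1, h2, h3⟩
      · rw [if_neg hs, ih config hj]
        congr 1
        simp only [List.mem_cons, eq_iff_iff]
        constructor
        · rintro ⟨t, ht, h⟩; exact ⟨t, Or.inr ht, h⟩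
        · rintro ⟨t, ht, h1, h2, h3⟩
          rcases ht with rfl | ht
          · exact absurd ⟨h1, h2⟩ hs
          · exact ⟨t, ht, h1, h2, h3⟩

-- ===== VERDICT (by name: the statement is the Claim_ definition above) =====
theorem somos_to_seniority_config_spec : Claim_equal_somos_to_seniority_config := by
  intro somos Norb _
  unfold Spec_somos_to_seniority_config somos_to_seniority_config_alt
  rw [portA_eq_map]
  have hlen : ((PySem.List.pyRange 0 Norb 1).map
      (fun i => if somos.contains i then (1:Int) else 0)).length = (List.replicate (max Norb 0).toNat (0:Int)).length := by
    simp [PySem.List.length_pyRange_one]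
    omega
  apply List.ext_getElem
  · rw [scatter_length]; exact hlen
  · intro j h1 h2
    have hj : j < (List.replicate (max Norb 0).toNat (0:Int)).length := by
      rw [← hlen]; exact h1
    rw [← List.getD_eq_getElem _ 0 h1, ← List.getD_eq_getElem _ 0 h2,
        scatter_getD somos Norb _ j hj]
    have hjN : (j : Int) < Norb := by
      simp [PySem.List.length_pyRange_one] at h1; omega
    rw [List.getD_eq_getElem _ 0 h1, List.getElem_map, PySem.List.getElem_pyRange_one,
        List.getD_eq_getElem _ 0 hj]
    simp only [zero_add, List.getElem_replicate]
    by_cases hmem : somos.contains (j : Int)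
    · rw [if_pos hmem, if_pos]
      exact ⟨(j : Int), by simpa using hmem, by positivity, hjN, by simp⟩
    · rw [if_neg hmem, if_neg]
      rintro ⟨s, hs, h0, _, hsj⟩
      have : s = (j : Int) := by omega
      subst this
      exact hmem (by simpa using hs)
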